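-- pv_equiv track=rewrite | github.com/cirosantilli/project-euler-solvers | solvers/550.py | compute_h_sequence
-- ===== SOURCE A (Python) =====
-- def compute_h_sequence(tmax: int):
--     """
--     h[t] = nimber for any pile with Ω(n)=t.
--
--     Induction:
--       - Proper divisors of a number with Ω=t have Ω in {1..t-1}.
--       - If nimbers depend only on Ω, then the set of option nimbers is exactly {h[1..t-1]}.
--       - Move replaces one pile by two piles => option nimber is xor of two values from that set.
--       - Therefore h[t] = mex( {h[i] xor h[j] : 1<=i,j<t} ).
--
--     Since tmax <= 23 for n=1e7, this is tiny.
--     """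
--     if tmax <= 0:
--         return [0] * (tmax + 1)
--
--     h = [0] * (tmax + 1)
--     h[1] = 0
--     prev = [0]  # [h[1], h[2], ..., h[t-1]] as we build
--
--     for t in range(2, tmax + 1):
--         reachable = set()
--         for a in prev:
--             for b in prev:
--                 reachable.add(a ^ b)
--         mex = 0
--         while mex in reachable:
--             mex += 1
--         h[t] = mex
--         prev.append(mex)
--
--     return h
-- ===== SOURCE B (Python) =====
-- def compute_h_sequence(tmax: int):
--     if tmax <= 0:
--         return [0] * (tmax + 1)
--
--     # Values are appended one by one (no preallocated array, no separate prev
--     # list: the previous nimbers are exactly h[1:]), and the xor-reachable set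
--     # is carried across iterations and only grows by xors with the new nimber.
--     h = [0, 0]
--     reach = {0}
--     while len(h) <= tmax:
--         mex = 0
--         while mex in reach:
--             mex += 1
--         reach |= {mex ^ a for a in h[1:]}
--         h.append(mex)
--     return h
-- ===== Notes on version B (the rewrite author's own statement) =====
-- stated objective: faster
-- what changed: Instead of preallocating the result array and rebuilding the full pairwise-xor set from scratch each step with a double loop over a separate prev list, B grows the result list by appending in a while-loop, drops the prev list (the previous nimbers are h[1:]), and carries the xor-reachable set across iterations, adding only the xors with the newly found nimber.
import Mathlib
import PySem

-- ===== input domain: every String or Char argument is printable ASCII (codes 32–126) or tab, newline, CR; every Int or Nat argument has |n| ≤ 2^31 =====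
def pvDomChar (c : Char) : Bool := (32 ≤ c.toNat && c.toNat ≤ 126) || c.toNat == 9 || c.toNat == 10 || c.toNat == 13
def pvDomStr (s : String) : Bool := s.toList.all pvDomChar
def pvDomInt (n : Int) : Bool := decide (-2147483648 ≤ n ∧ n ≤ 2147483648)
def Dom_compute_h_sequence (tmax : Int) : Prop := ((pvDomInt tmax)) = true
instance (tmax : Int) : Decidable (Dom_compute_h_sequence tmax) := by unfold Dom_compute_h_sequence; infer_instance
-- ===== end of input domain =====

-- B appends results to a growing list in a while-loop (no preallocated array, no separate
-- prev list) and carries the xor-reachable set across iterations, adding only xors with the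
-- newly found nimber; A rebuilds the whole pairwise-xor set each step. Return values proved equal.

-- termination helper for the 'mex = 0; while mex in reachable: mex += 1' loop of both programs
theorem pvMexLoop_dec (reachable : List Int) (mex : Int) (hm : mex ∈ reachable) :
    (reachable.filter (fun x => decide (mex + 1 ≤ x))).length
      < (reachable.filter (fun x => decide (mex ≤ x))).length := by
  have hsub : reachable.filter (fun x => decide (mex + 1 ≤ x))
      = (reachable.filter (fun x => decide (mex ≤ x))).filter (fun x => decide (mex + 1 ≤ x)) := by
    rw [List.filter_filter]
    apply List.filter_congr
    intro x _
    by_cases h : mex + 1 ≤ x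
    · simp [h, show mex ≤ x by omega]
    · simp [h]
  rw [hsub]
  apply List.length_filter_lt_length_iff_exists.mpr
  exact ⟨mex, by simp [hm], by simp⟩

-- faithful port of the 'while mex in reachable: mex += 1' loop appearing in both A and B
def pvMexLoop (reachable : List Int) (mex : Int) : Int :=
  if mex ∈ reachable then pvMexLoop reachable (mex + 1) else mex
termination_by (reachable.filter (fun x => decide (mex ≤ x))).length
decreasing_by exact pvMexLoop_dec reachable mex (by assumption)

-- ===== PORT A =====
def compute_h_sequence (tmax : Int) : List Int :=
  if tmax ≤ 0 then List.replicate (tmax + 1).toNat 0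
  else
    let h0 : List Int := List.replicate (tmax + 1).toNat 0
    let h1 := PySem.List.pySetD h0 1 0
    let st := (PySem.List.pyRange 2 (tmax + 1) 1).foldl
      (fun (st : List Int × List Int) t =>
        let reachable := st.2.foldl
          (fun r a => st.2.foldl (fun r b => PySem.Set.add r (PySem.Int.bxor a b)) r)
          PySem.Set.empty
        let mex := pvMexLoop reachable 0
        (PySem.List.pySetD st.1 t mex, st.2 ++ [mex]))
      (h1, [0])
    st.1

-- ===== PORT B =====
-- the 'while len(h) <= tmax:' loop of Source B
def pvAltGo (tmax : Int) (h : List Int) (reach : PySem.Set Int) : List Int :=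
  if (h.length : Int) ≤ tmax then
    let mex := pvMexLoop reach 0
    pvAltGo tmax (h ++ [mex])
      (PySem.Set.union reach
        (PySem.Set.ofList ((PySem.List.slice h (some 1) none).map (fun a => PySem.Int.bxor mex a))))
  else h
termination_by (tmax + 1 - h.length).toNat
decreasing_by simp only [List.length_append, List.length_cons, List.length_nil]; omega

def compute_h_sequence_alt (tmax : Int) : List Int :=
  if tmax ≤ 0 then List.replicate (tmax + 1).toNat 0
  else pvAltGo tmax [0, 0] (PySem.Set.ofList [0])

-- ===== PRECONDITION & SPEC =====
def Spec_compute_h_sequence (tmax : Int) (out : List Int) : Prop := out = compute_h_sequence_alt tmax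
instance (tmax : Int) (out : List Int) : Decidable (Spec_compute_h_sequence tmax out) := by unfold Spec_compute_h_sequence; infer_instance

-- ===== CLAIM (what is proved, stated in full; the proofs are below) =====
def Claim_equal_compute_h_sequence : Prop := ∀ (tmax : Int), Dom_compute_h_sequence tmax → Spec_compute_h_sequence tmax (compute_h_sequence tmax)

-- ===== LEMMAS AND PROOFS =====

-- the mex loop depends only on membership in the set
theorem pvMexLoop_congr (r1 r2 : List Int) (h : ∀ x, x ∈ r1 ↔ x ∈ r2) (mex : Int) :
    pvMexLoop r1 mex = pvMexLoop r2 mex := by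
  fun_induction pvMexLoop r1 mex with
  | case1 mex hm ih =>
    conv_rhs => rw [pvMexLoop]
    rw [if_pos ((h mex).mp hm)]
    exact ih
  | case2 mex hm =>
    conv_rhs => rw [pvMexLoop]
    rw [if_neg (fun hx => hm ((h mex).mpr hx))]

-- membership in A's freshly built double-fold set
theorem mem_double_fold (l prev : List Int) (s0 : PySem.Set Int) (x : Int) :
    x ∈ l.foldl
        (fun r a => prev.foldl (fun r b => PySem.Set.add r (PySem.Int.bxor a b)) r) s0
      ↔ x ∈ s0 ∨ ∃ a ∈ l, ∃ b ∈ prev, x = PySem.Int.bxor a b := by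
  induction l generalizing s0 with
  | nil => simp
  | cons a l ih =>
    simp only [List.foldl_cons, ih, PySem.Set.mem_foldl_add, List.mem_cons]
    constructor
    · rintro ((h | ⟨b, hb, rfl⟩) | ⟨c, hc, d, hd, rfl⟩)
      · exact Or.inl h
      · exact Or.inr ⟨a, Or.inl rfl, b, hb, rfl⟩
      · exact Or.inr ⟨c, Or.inr hc, d, hd, rfl⟩
    · rintro (h | ⟨c, (rfl | hc), d, hd, rfl⟩)
      · exact Or.inl (Or.inl h)
      · exact Or.inl (Or.inr ⟨d, hd, rfl⟩)
      · exact Or.inr ⟨c, hc, d, hd, rfl⟩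

-- setting the first element after a prefix
theorem set_append_len {α : Type} (l : List α) (x : α) (r : List α) (v : α) :
    (l ++ x :: r).set l.length v = l ++ v :: r := by
  induction l with
  | nil => rfl
  | cons a l ih => simp [ih]

-- main loop invariant, by induction on the number k of remaining iterations
theorem loop_agree (k : Nat) (tmax : Int) (Bh : List Int) (reach : PySem.Set Int)
    (hlen : 2 ≤ Bh.length) (hk : (Bh.length : Int) + k = tmax + 1)
    (hreach : ∀ x, x ∈ reach ↔ ∃ a ∈ Bh.drop 1, ∃ b ∈ Bh.drop 1, x = PySem.Int.bxor a b) :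
    ((PySem.List.pyRange (Bh.length : Int) (tmax + 1) 1).foldl
      (fun (st : List Int × List Int) t =>
        let reachable := st.2.foldl
          (fun r a => st.2.foldl (fun r b => PySem.Set.add r (PySem.Int.bxor a b)) r)
          PySem.Set.empty
        let mex := pvMexLoop reachable 0
        (PySem.List.pySetD st.1 t mex, st.2 ++ [mex]))
      (Bh ++ List.replicate k 0, Bh.drop 1)).1
    = pvAltGo tmax Bh reach := by
  induction k generalizing Bh reach with
  | zero =>
    rw [pvAltGo, if_neg (by omega)]
    rw [show PySem.List.pyRange (Bh.length : Int) (tmax + 1) 1 = [] from by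
      simp [PySem.List.pyRange]; omega]
    simp
  | succ k ih =>
    rw [PySem.List.pyRange_one_cons (by omega)]
    simp only [List.foldl_cons]
    -- the two mex computations agree
    have hmex : pvMexLoop
        ((Bh.drop 1).foldl
          (fun r a => (Bh.drop 1).foldl (fun r b => PySem.Set.add r (PySem.Int.bxor a b)) r)
          PySem.Set.empty) 0
        = pvMexLoop reach 0 := by
      apply pvMexLoop_congr
      intro x
      rw [mem_double_fold, hreach]
      simp [PySem.Set.empty]
    rw [hmex]
    set mex := pvMexLoop reach 0 with hm
    -- A's array update writes exactly at the end of the built prefix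
    have hset : PySem.List.pySetD (Bh ++ List.replicate (k + 1) 0) (Bh.length : Int) mex
        = (Bh ++ [mex]) ++ List.replicate k 0 := by
      rw [PySem.List.pySetD_natCast]
      rw [show List.replicate (k + 1) (0 : Int) = 0 :: List.replicate k 0 from rfl]
      rw [set_append_len]
      simp
    rw [hset]
    rw [pvAltGo, if_pos (by omega), ← hm]
    have hprev : Bh.drop 1 ≠ [] := by
      intro h
      have := congrArg List.length h
      simp at this
      omega
    have hdrop : (Bh ++ [mex]).drop 1 = Bh.drop 1 ++ [mex] := by
      rw [List.drop_append_of_le_length (by omega)]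
    rw [show Bh.drop 1 ++ [mex] = (Bh ++ [mex]).drop 1 from hdrop.symm]
    have := ih (Bh ++ [mex])
      (PySem.Set.union reach
        (PySem.Set.ofList ((PySem.List.slice Bh (some 1) none).map (fun a => PySem.Int.bxor mex a))))
      (by simp; omega) (by simp; omega) ?_
    · rw [show ((Bh ++ [mex]).length : Int) = (Bh.length : Int) + 1 from by simp] at this
      exact this
    · intro x
      rw [PySem.Set.mem_union, PySem.Set.mem_ofList, hreach]
      rw [PySem.List.slice_from_one]
      have htail : Bh.tail = Bh.drop 1 := by simp
      rw [htail, hdrop]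
      constructor
      · rintro (⟨a, ha, b, hb, rfl⟩ | hx)
        · exact ⟨a, List.mem_append_left _ ha, b, List.mem_append_left _ hb, rfl⟩
        · simp only [List.mem_map] at hx
          rcases hx with ⟨a, ha, rfl⟩
          exact ⟨mex, List.mem_append_right _ (List.mem_singleton_self _), a, List.mem_append_left _ ha, rfl⟩
      · rintro ⟨a, ha, b, hb, rfl⟩
        simp only [List.mem_append, List.mem_singleton] at ha hb
        rcases ha with ha | rfl
        · rcases hb with hb | rfl
          · exact Or.inl ⟨a, ha, b, hb, rfl⟩
          · exact Or.inr (by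
              simp only [List.mem_map]
              exact ⟨a, ha, by rw [PySem.Int.bxor_comm]⟩)
        · rcases hb with hb | rfl
          · exact Or.inr (by simp only [List.mem_map]; exact ⟨b, hb, rfl⟩)
          · rcases List.exists_mem_of_ne_nil _ hprev with ⟨c, hc⟩
            exact Or.inl ⟨c, hc, c, hc, by rw [PySem.Int.bxor_self, PySem.Int.bxor_self]⟩

-- ===== VERDICT (by name: the statement is the Claim_ definition above) =====
theorem compute_h_sequence_spec : Claim_equal_compute_h_sequence := by
  intro tmax _
  unfold Spec_compute_h_sequence compute_h_sequence compute_h_sequence_alt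
  split
  · rfl
  · rename_i htmax
    have h1 : 1 ≤ tmax := by omega
    -- the initial preallocated array, with h[1] := 0 a no-op, is [0,0] ++ zeros
    obtain ⟨m, hm⟩ : ∃ m : Nat, (tmax + 1).toNat = m + 2 := ⟨(tmax + 1).toNat - 2, by omega⟩
    have hinit : PySem.List.pySetD (List.replicate (tmax + 1).toNat (0 : Int)) 1 0
        = [0, 0] ++ List.replicate m 0 := by
      rw [hm]
      rw [show PySem.List.pySetD (List.replicate (m + 2) (0 : Int)) 1 0
          = (List.replicate (m + 2) (0 : Int)).set 1 0 from by
        rw [show (1 : Int) = ((1 : Nat) : Int) from rfl, PySem.List.pySetD_natCast]]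
      simp [List.replicate_succ]
    simp only [hinit]
    have := loop_agree m tmax [0, 0] (PySem.Set.ofList [0])
      (by simp) (by simp; omega)
      (by intro x; simp [PySem.Set.mem_ofList, PySem.Int.bxor])
    rw [show (([0, 0] : List Int).length : Int) = 2 from rfl] at this
    rw [show (([0, 0] : List Int).drop 1) = [0] from rfl] at this
    exact this
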